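-- pv_equiv track=rewrite | github.com/B-OPRF/Blocklist-OPRF | Accuracy/ESP.py | deterTypeOne
-- ===== SOURCE A (Python) =====
-- def deterTypeOne(s):
--   ret = []
--   i = 0
--   while (i<len(s)-1):
--     curr = s[i]
--     j = i+1
--     if (s[j] != curr):
--       i += 1
--       continue
--     res = s[j] == curr
--     while (res and (j<len(s))):
--       j += 1
--       if (j<len(s)):
--         res = s[j] == curr
--     ret.append([i,j])
--     i = j
--   return ret
-- ===== SOURCE B (Python) =====
-- def deterTypeOne(s):
--     # single forward pass: collect run lengths, then emit intervals for runs of length >= 2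
--     lens = []
--     prev = None
--     for ch in s:
--         if lens and ch == prev:
--             lens[-1] += 1
--         else:
--             lens.append(1)
--         prev = ch
--     ret = []
--     pos = 0
--     for L in lens:
--         if L >= 2:
--             ret.append([pos, pos + L])
--         pos += L
--     return ret
-- ===== Notes on version B (the rewrite author's own statement) =====
-- stated objective: alternative
-- what changed: Replaces A's nested two-pointer while loops (inner loop re-scans each run to find its end, outer pointer jumps past it) by a single forward pass that groups the string into run lengths and then emits [pos, pos+L] for each run with L >= 2.
import Mathlib
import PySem

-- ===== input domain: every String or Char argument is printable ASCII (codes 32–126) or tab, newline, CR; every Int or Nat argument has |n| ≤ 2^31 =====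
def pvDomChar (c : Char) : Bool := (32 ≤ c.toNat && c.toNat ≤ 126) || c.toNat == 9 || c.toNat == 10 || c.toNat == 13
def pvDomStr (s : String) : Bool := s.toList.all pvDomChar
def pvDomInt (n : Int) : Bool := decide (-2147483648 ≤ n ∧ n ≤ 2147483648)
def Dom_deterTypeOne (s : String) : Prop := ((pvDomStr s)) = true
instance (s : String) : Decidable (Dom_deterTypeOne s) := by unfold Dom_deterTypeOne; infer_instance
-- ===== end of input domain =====

-- B replaces A's nested two-pointer scan by one forward pass over run lengths; alternative decomposition, same cost.

-- ===== PORT A =====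
-- inner `while (res and (j<len(s)))` loop of A; string indexing s[j] is in range
-- whenever read (guarded by j' < len), so `getD` is exact here.
def innerA (cs : List Char) (curr : Char) (res : Bool) (j : Nat) : Nat :=
  if h : res = true ∧ j < cs.length then
    innerA cs curr (if j + 1 < cs.length then cs.getD (j + 1) ' ' == curr else res) (j + 1)
  else j
termination_by cs.length - j
decreasing_by omega

theorem innerA_ge (cs : List Char) (curr : Char) (res : Bool) (j : Nat) :
    j ≤ innerA cs curr res j := by
  induction hn : cs.length - j using Nat.strong_induction_on generalizing res j with
  | _ n ih =>
  rw [innerA]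
  split
  · next h =>
    have := ih (cs.length - (j + 1)) (by omega)
      (if j + 1 < cs.length then cs.getD (j + 1) ' ' == curr else res) (j + 1) rfl
    omega
  · omega

-- outer `while (i<len(s)-1)` loop of A (i < len-1 ⟺ i+1 < len on naturals)
def outerA (cs : List Char) (ret : List (List Int)) (i : Nat) : List (List Int) :=
  if h : i + 1 < cs.length then
    if cs.getD (i + 1) ' ' != cs.getD i ' ' then
      outerA cs ret (i + 1)
    else
      outerA cs
        (ret ++ [[(i : Int),
          ((innerA cs (cs.getD i ' ') (cs.getD (i + 1) ' ' == cs.getD i ' ') (i + 1) : Nat) : Int)]])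
        (innerA cs (cs.getD i ' ') (cs.getD (i + 1) ' ' == cs.getD i ' ') (i + 1))
  else ret
termination_by cs.length - i
decreasing_by
  · omega
  · have := innerA_ge cs (cs.getD i ' ') (cs.getD (i + 1) ' ' == cs.getD i ' ') (i + 1); omega

def deterTypeOne (s : String) : List (List Int) :=
  outerA s.toList [] 0

-- ===== PORT B =====
-- first loop of Source B: run lengths of the string, newest run kept at the head
-- (reversed accumulator, standard transliteration of append-at-end / bump-last)
def runStep (st : List Nat × Option Char) (ch : Char) : List Nat × Option Char :=
  match st with
  | (n :: ns, some p) => if ch == p then ((n + 1) :: ns, some p) else (1 :: n :: ns, some ch)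
  | (ns, _) => (1 :: ns, some ch)

def deterTypeOne_alt (s : String) : List (List Int) :=
  let lens := (s.toList.foldl runStep ([], none)).1.reverse
  (lens.foldl
    (fun (st : List (List Int) × Nat) (L : Nat) =>
      (if 2 ≤ L then st.1 ++ [[(st.2 : Int), (st.2 : Int) + (L : Int)]] else st.1, st.2 + L))
    ([], 0)).1

-- ===== PRECONDITION & SPEC =====
def Spec_deterTypeOne (s : String) (out : List (List Int)) : Prop := out = deterTypeOne_alt s
instance (s : String) (out : List (List Int)) : Decidable (Spec_deterTypeOne s out) := by unfold Spec_deterTypeOne; infer_instance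

-- ===== CLAIM (what is proved, stated in full; the proofs are below) =====
def Claim_equal_deterTypeOne : Prop := ∀ (s : String), Dom_deterTypeOne s → Spec_deterTypeOne s (deterTypeOne s)

-- ===== LEMMAS AND PROOFS =====

-- run lengths of a list, head-first (proof-side reference function)
def runsGo (c : Char) (n : Nat) : List Char → List Nat
  | [] => [n]
  | d :: rest => if d == c then runsGo c (n + 1) rest else n :: runsGo d 1 rest

def runsB : List Char → List Nat
  | [] => []
  | c :: rest => runsGo c 1 rest

-- intervals emitted from run lengths starting at position pos
def emit : List Nat → Nat → List (List Int)
  | [], _ => []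
  | L :: ls, pos =>
      (if 2 ≤ L then [[(pos : Int), (pos : Int) + (L : Int)]] else []) ++ emit ls (pos + L)

theorem runsGo_spec (c : Char) (n : Nat) (l : List Char) :
    runsGo c n l = (n + (l.takeWhile (· == c)).length) :: runsB (l.dropWhile (· == c)) := by
  induction l generalizing n with
  | nil => simp [runsGo, runsB]
  | cons d rest ih =>
    by_cases h : d = c
    · subst h
      simp [runsGo, List.takeWhile, List.dropWhile, ih (n + 1)]
      omega
    · have hb : (d == c) = false := by simp [h]
      simp [runsGo, runsB, List.takeWhile, List.dropWhile, hb]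

theorem innerA_spec (cs : List Char) (curr : Char) (j : Nat) (hj : j < cs.length) :
    innerA cs curr true j = (j + 1) + ((cs.drop (j + 1)).takeWhile (· == curr)).length := by
  induction hn : cs.length - j using Nat.strong_induction_on generalizing j with
  | _ n ih =>
  rw [innerA]
  rw [dif_pos ⟨rfl, hj⟩]
  by_cases h1 : j + 1 < cs.length
  · have hdrop : cs.drop (j + 1) = cs[j + 1] :: cs.drop (j + 2) := List.drop_eq_getElem_cons h1
    have hget : cs.getD (j + 1) ' ' = cs[j + 1] := List.getD_eq_getElem cs ' ' h1
    by_cases he : cs[j + 1] = curr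
    · have : (if j + 1 < cs.length then cs.getD (j + 1) ' ' == curr else true) = true := by
        simp [h1, he]
      rw [this, ih (cs.length - (j + 1)) (by omega) (j + 1) h1 rfl]
      rw [hdrop]
      simp [List.takeWhile, he]
      simp only [show j + 1 + 1 = j + 2 from by omega]
      omega
    · have : (if j + 1 < cs.length then cs.getD (j + 1) ' ' == curr else true) = false := by
        simp [h1, he]
      rw [this, innerA, dif_neg (by simp)]
      rw [hdrop]
      have hb : (cs[j + 1] == curr) = false := by simp [he]
      simp [List.takeWhile, hb]
  · have hlen : cs.length = j + 1 := by omega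
    have : (if j + 1 < cs.length then cs.getD (j + 1) ' ' == curr else true) = true := by
      simp [h1]
    rw [this, innerA, dif_neg (by omega)]
    simp [List.drop_eq_nil_of_le (by omega : cs.length ≤ j + 1)]

theorem dropWhile_eq_drop_length {p : Char → Bool} (l : List Char) :
    l.dropWhile p = l.drop (l.takeWhile p).length := by
  induction l with
  | nil => rfl
  | cons a l ih =>
    by_cases h : p a = true
    · simp [List.takeWhile_cons, h, ih]
    · simp [h]

theorem outerA_emit (cs : List Char) (ret : List (List Int)) (i : Nat) :
    outerA cs ret i = ret ++ emit (runsB (cs.drop i)) i := by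
  induction hn : cs.length - i using Nat.strong_induction_on generalizing ret i with
  | _ n ih =>
  rw [outerA]
  by_cases h : i + 1 < cs.length
  · rw [dif_pos h]
    have hi : i < cs.length := by omega
    have hdropi : cs.drop i = cs[i] :: cs.drop (i + 1) := List.drop_eq_getElem_cons hi
    have hdropi1 : cs.drop (i + 1) = cs[i + 1] :: cs.drop (i + 2) := List.drop_eq_getElem_cons h
    have hgi : cs.getD i ' ' = cs[i] := List.getD_eq_getElem cs ' ' hi
    have hgj : cs.getD (i + 1) ' ' = cs[i + 1] := List.getD_eq_getElem cs ' ' h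
    rw [hgi, hgj]
    by_cases he : cs[i + 1] = cs[i]
    · -- equal branch: the inner loop consumes the whole run
      rw [if_neg (by simp [he])]
      have hres : (cs[i + 1] == cs[i]) = true := by simp [he]
      rw [hres]
      set tw2 := ((cs.drop (i + 2)).takeWhile (· == cs[i])).length with htw2
      have hj' : innerA cs cs[i] true (i + 1) = i + 2 + tw2 := by
        rw [innerA_spec cs cs[i] (i + 1) h]
      rw [hj']
      rw [ih (cs.length - (i + 2 + tw2)) (by omega) _ (i + 2 + tw2) rfl]
      rw [hdropi, runsB, runsGo_spec, hdropi1,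
        List.takeWhile_cons_of_pos (p := (· == cs[i])) (by simpa using hres),
        List.dropWhile_cons_of_pos (p := (· == cs[i])) (by simpa using hres),
        dropWhile_eq_drop_length, List.drop_drop]
      simp only [List.length_cons, ← htw2]
      rw [emit, if_pos (by omega : 2 ≤ 1 + (tw2 + 1))]
      rw [show i + (1 + (tw2 + 1)) = i + 2 + tw2 from by omega]
      have harith : (i : Int) + ((1 + (tw2 + 1) : Nat) : Int) = ((i + 2 + tw2 : Nat) : Int) := by
        push_cast; ring
      rw [harith]
      simp
    · -- unequal branch: the pointer steps by one
      rw [if_pos (by simp [he])]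
      have hresf : (cs[i + 1] == cs[i]) = false := by simp [he]
      rw [ih (cs.length - (i + 1)) (by omega) ret (i + 1) rfl]
      rw [hdropi, runsB, runsGo_spec, hdropi1,
        List.takeWhile_cons_of_neg (p := (· == cs[i])) (by simp [he]),
        List.dropWhile_cons_of_neg (p := (· == cs[i])) (by simp [he])]
      rw [← hdropi1]
      simp only [List.length_nil]
      rw [emit, if_neg (by omega)]
      rw [show i + (1 + 0) = i + 1 from by omega]
      rw [hdropi1]
      simp [runsB]
  · rw [dif_neg h]
    cases hd : cs.drop i with
    | nil => simp [runsB, emit]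
    | cons c rest =>
      have hlen : rest = [] := by
        have hlc := congrArg List.length hd
        simp at hlc
        cases rest with
        | nil => rfl
        | cons _ _ => simp at hlc; omega
      subst hlen
      simp [runsB, runsGo, emit]

theorem fold1_spec (cs : List Char) (r : Nat) (rsrev : List Nat) (p : Char) :
    ((cs.foldl runStep (r :: rsrev, some p)).1).reverse = rsrev.reverse ++ runsGo p r cs := by
  induction cs generalizing r rsrev p with
  | nil => simp [runsGo]
  | cons ch cs ih =>
    by_cases h : ch = p
    · subst h
      simp only [List.foldl, runStep, beq_self_eq_true, if_pos]
      rw [ih (r + 1) rsrev ch]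
      simp [runsGo]
    · have hb : (ch == p) = false := by simp [h]
      simp only [List.foldl, runStep, hb, if_neg, Bool.false_eq_true, not_false_iff]
      rw [ih 1 (r :: rsrev) ch]
      simp [runsGo, hb]

theorem fold2_spec (L : List Nat) (acc : List (List Int)) (pos : Nat) :
    (L.foldl
      (fun (st : List (List Int) × Nat) (l : Nat) =>
        (if 2 ≤ l then st.1 ++ [[(st.2 : Int), (st.2 : Int) + (l : Int)]] else st.1, st.2 + l))
      (acc, pos)).1 = acc ++ emit L pos := by
  induction L generalizing acc pos with
  | nil => simp [emit]
  | cons l ls ih =>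
    by_cases h : 2 ≤ l
    · simp only [List.foldl, if_pos h]
      rw [ih]
      simp [emit, if_pos h]
    · simp only [List.foldl, if_neg h]
      rw [ih]
      simp [emit, if_neg h]

theorem alt_emit (s : String) : deterTypeOne_alt s = emit (runsB s.toList) 0 := by
  unfold deterTypeOne_alt
  cases hs : s.toList with
  | nil => simp [runsB, emit]
  | cons c cs =>
    have h1 : runStep ([], none) c = ([1], some c) := by simp [runStep]
    simp only [List.foldl, h1]
    rw [fold2_spec, fold1_spec]
    simp [runsB]

-- ===== VERDICT (by name: the statement is the Claim_ definition above) =====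
theorem deterTypeOne_spec : Claim_equal_deterTypeOne := by
  intro s _
  show deterTypeOne s = deterTypeOne_alt s
  rw [alt_emit, deterTypeOne, outerA_emit]
  simp
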